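-- pv_equiv track=rewrite | github.com/SiddharthSahai10/RIFT-Continnum | services/langgraph_pipeline.py | _extract_first_error_line
-- ===== SOURCE A (Python) =====
-- def _extract_first_error_line(output: str) -> str:
--     """Pull the first meaningful error line from raw output."""
--     for line in output.splitlines():
--         stripped = line.strip()
--         if not stripped:
--             continue
--         low = stripped.lower()
--         if any(kw in low for kw in ["error", "fail", "exception", "traceback", "assert"]):
--             return stripped[:300]
--     # Fallback: first non-empty line
--     for line in output.splitlines():
--         if line.strip():
--             return line.strip()[:300]
--     return "Test process exited with non-zero code"
-- ===== SOURCE B (Python) =====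
-- def _extract_first_error_line(output: str) -> str:
--     """Single pass: remember the first non-empty line while scanning for a keyword line."""
--     fallback = None
--     for line in output.splitlines():
--         stripped = line.strip()
--         if not stripped:
--             continue
--         low = stripped.lower()
--         if any(kw in low for kw in ["error", "fail", "exception", "traceback", "assert"]):
--             return stripped[:300]
--         if fallback is None:
--             fallback = stripped
--     if fallback is not None:
--         return fallback[:300]
--     return "Test process exited with non-zero code"
-- ===== Notes on version B (the rewrite author's own statement) =====
-- stated objective: simpler
-- what changed: Replaces A's two sequential scans of output.splitlines() by a single traversal that remembers the first non-empty stripped line as a fallback while searching for a keyword line.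
import Mathlib
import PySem

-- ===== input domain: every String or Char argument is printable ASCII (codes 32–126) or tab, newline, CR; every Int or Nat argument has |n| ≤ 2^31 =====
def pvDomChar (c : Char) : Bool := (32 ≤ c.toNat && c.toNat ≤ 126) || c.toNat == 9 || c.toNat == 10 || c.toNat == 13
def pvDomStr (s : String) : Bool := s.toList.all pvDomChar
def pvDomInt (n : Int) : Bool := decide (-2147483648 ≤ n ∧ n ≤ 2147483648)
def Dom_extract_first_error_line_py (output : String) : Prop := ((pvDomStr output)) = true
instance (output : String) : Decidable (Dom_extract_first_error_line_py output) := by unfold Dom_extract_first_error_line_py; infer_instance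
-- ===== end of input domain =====

-- B: one pass over the lines, remembering the first non-empty stripped line as fallback (objective: simpler).

-- ===== PORT A =====
def pvKws : List String := ["error", "fail", "exception", "traceback", "assert"]

-- first loop of A: return stripped[:300] of the first keyword-bearing non-empty line
def pvALoop1 : List String → Option String
  | [] => none
  | line :: rest =>
    let stripped := PySem.Str.strip line
    if stripped == "" then pvALoop1 rest
    else
      let low := PySem.Str.lower stripped
      if pvKws.any (fun kw => PySem.Str.isIn kw low) then
        some (PySem.Str.slice stripped none (some 300))
      else pvALoop1 rest

-- second loop of A: first non-empty line, stripped and cut to 300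
def pvALoop2 : List String → Option String
  | [] => none
  | line :: rest =>
    if PySem.Str.strip line == "" then pvALoop2 rest
    else some (PySem.Str.slice (PySem.Str.strip line) none (some 300))

def extract_first_error_line_py (output : String) : String :=
  match pvALoop1 (PySem.Str.splitlines output) with
  | some r => r
  | none =>
    match pvALoop2 (PySem.Str.splitlines output) with
    | some r => r
    | none => "Test process exited with non-zero code"

-- ===== PORT B =====
def pvBLoop : List String → Option String → String
  | [], fallback =>
    match fallback with
    | some f => PySem.Str.slice f none (some 300)
    | none => "Test process exited with non-zero code"
  | line :: rest, fallback =>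
    let stripped := PySem.Str.strip line
    if stripped == "" then pvBLoop rest fallback
    else
      let low := PySem.Str.lower stripped
      if pvKws.any (fun kw => PySem.Str.isIn kw low) then
        PySem.Str.slice stripped none (some 300)
      else pvBLoop rest (if fallback.isNone then some stripped else fallback)

def extract_first_error_line_py_alt (output : String) : String :=
  pvBLoop (PySem.Str.splitlines output) none

-- ===== PRECONDITION & SPEC =====
def Spec_extract_first_error_line_py (output : String) (out : String) : Prop := out = extract_first_error_line_py_alt output
instance (output : String) (out : String) : Decidable (Spec_extract_first_error_line_py output out) := by unfold Spec_extract_first_error_line_py; infer_instance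

-- ===== CLAIM (what is proved, stated in full; the proofs are below) =====
def Claim_equal_extract_first_error_line_py : Prop := ∀ (output : String), Dom_extract_first_error_line_py output → Spec_extract_first_error_line_py output (extract_first_error_line_py output)

-- ===== LEMMAS AND PROOFS =====

-- first non-empty stripped line
def pvFirst : List String → Option String
  | [] => none
  | line :: rest =>
    if PySem.Str.strip line == "" then pvFirst rest
    else some (PySem.Str.strip line)

lemma pvALoop2_eq (ls : List String) :
    pvALoop2 ls = (pvFirst ls).map (fun f => PySem.Str.slice f none (some 300)) := by
  induction ls with
  | nil => rfl
  | cons line rest ih =>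
    simp only [pvALoop2, pvFirst]
    split_ifs with h
    · exact ih
    · rfl

lemma pvBLoop_eq (ls : List String) (fb : Option String) :
    pvBLoop ls fb =
      match pvALoop1 ls with
      | some r => r
      | none =>
        match fb.or (pvFirst ls) with
        | some f => PySem.Str.slice f none (some 300)
        | none => "Test process exited with non-zero code" := by
  induction ls generalizing fb with
  | nil => cases fb <;> rfl
  | cons line rest ih =>
    simp only [pvBLoop, pvALoop1, pvFirst]
    by_cases h : (PySem.Str.strip line == "") = true
    · rw [if_pos h, if_pos h, if_pos h]
      exact ih fb
    · rw [if_neg h, if_neg h, if_neg h]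
      by_cases hk : (pvKws.any fun kw => PySem.Str.isIn kw (PySem.Str.lower (PySem.Str.strip line))) = true
      · rw [if_pos hk, if_pos hk]
      · rw [if_neg hk, if_neg hk, ih]
        cases fb <;> cases pvALoop1 rest <;> simp

-- ===== VERDICT (by name: the statement is the Claim_ definition above) =====
theorem extract_first_error_line_py_spec : Claim_equal_extract_first_error_line_py := by
  intro output _
  show extract_first_error_line_py output = extract_first_error_line_py_alt output
  unfold extract_first_error_line_py extract_first_error_line_py_alt
  rw [pvBLoop_eq, Option.none_or, pvALoop2_eq]
  cases pvALoop1 (PySem.Str.splitlines output) with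
  | some r => rfl
  | none => cases pvFirst (PySem.Str.splitlines output) <;> rfl
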